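-- pv_equiv track=rewrite | github.com/daniel-reich/ubiquitous-fiesta | zqr6f8dRD84K8Lvzk_20.py | hex_lattice
-- ===== SOURCE A (Python) =====
-- def hex_lattice(n):
--     i, h = 0, 1
--     while h < n:
--         i += 1
--         h = h + (6 * i) - 6
--     if h > n:
--         return "Invalid"
--     elif n == 1:
--         return " o "
--     add = (i + i - 1) * " o" + " \n"
--     r = [add]
--     for x in range(i - 1):
--         add = add.replace("o", "", 1)
--         add = add[::-1].replace(" ", "  ", 1)[::-1]
--         r.insert(0, add)
--         r.append(add)
--     return "".join(r)[:-2] + " "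
-- ===== SOURCE B (Python) =====
-- def hex_lattice(n):
--     i, h = 0, 1
--     while h < n:
--         i += 1
--         h = h + (6 * i) - 6
--     if h > n:
--         return "Invalid"
--     if n == 1:
--         return " o "
--     rows = []
--     for k in range(2 * i - 1):
--         c = i + min(k, 2 * i - 2 - k)
--         e = (2 * i - 1) - c
--         rows.append(e * " " + c * " o" + " " + e * " ")
--     return "\n".join(rows)
-- ===== Notes on version B (the rewrite author's own statement) =====
-- stated objective: simpler
-- what changed: Row construction: instead of mutating the middle-row string with replace/reverse tricks and mirror-inserting into a list, B builds each row independently from a closed-form pad/cell count and joins the rows with newlines (the loop finding i and the invalid-size and single-cell guards are kept).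
import Mathlib
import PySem

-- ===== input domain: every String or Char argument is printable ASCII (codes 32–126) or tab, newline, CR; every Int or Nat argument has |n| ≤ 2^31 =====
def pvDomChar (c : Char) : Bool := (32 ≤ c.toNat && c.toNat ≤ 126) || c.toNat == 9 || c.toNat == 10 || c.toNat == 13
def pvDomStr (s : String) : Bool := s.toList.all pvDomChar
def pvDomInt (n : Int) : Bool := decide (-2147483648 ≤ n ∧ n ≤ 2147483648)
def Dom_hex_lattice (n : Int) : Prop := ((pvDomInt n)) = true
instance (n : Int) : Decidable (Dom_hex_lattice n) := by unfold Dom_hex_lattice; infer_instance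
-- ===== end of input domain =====

-- B replaces A's string mutation (replace/reverse/mirror-insert) by building each row
-- from a closed-form cell/pad count and joining with newlines; objective: simpler.

-- the 'while h < n: i += 1; h = h + 6*i - 6' loop, shared verbatim by both Pythons;
-- fuel n.toNat is enough iterations for every n (proved below in hexLoop_fuel_enough)
def hexLoop : Nat → Int → Int → Int → Int × Int
  | 0, _, i, h => (i, h)
  | fuel + 1, n, i, h =>
      if h < n then hexLoop fuel n (i + 1) (h + 6 * (i + 1) - 6) else (i, h)

-- hand port of Python's s.replace(old, new, 1) — exact for nonempty old (all our calls
-- use a single-character old): replace the first occurrence of old, if any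
def replaceFirst : List Char → List Char → List Char → List Char
  | [], _, _ => []
  | c :: rest, old, new =>
      if (c :: rest).take old.length = old then new ++ (c :: rest).drop old.length
      else c :: replaceFirst rest old new

-- ===== PORT A =====
def hex_lattice (n : Int) : String :=
  let p := hexLoop n.toNat n 0 1
  let i := p.1
  let h := p.2
  if h > n then "Invalid"
  else if n = 1 then " o "
  else
    let add0 : List Char := PySem.List.pyRepeat [' ', 'o'] (i + i - 1) ++ [' ', '\n']
    let st := (PySem.List.pyRange 0 (i - 1) 1).foldl
      (fun (st : List Char × List (List Char)) _ =>
        let a1 := replaceFirst st.1 ['o'] []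
        -- add[::-1].replace(" ", "  ", 1)[::-1]; s[::-1] is reversal (PySem.Str.slice?_none_none_neg_one)
        let a2 := (replaceFirst a1.reverse [' '] [' ', ' ']).reverse
        (a2, a2 :: st.2 ++ [a2]))      -- r.insert(0, add); r.append(add)
      (add0, [add0])
    String.ofList (PySem.List.slice (PySem.Chars.join [] st.2) none (some (-2)) ++ [' '])

-- ===== PORT B =====
def hex_lattice_alt (n : Int) : String :=
  let p := hexLoop n.toNat n 0 1
  let i := p.1
  let h := p.2
  if h > n then "Invalid"
  else if n = 1 then " o "
  else
    let rows := (PySem.List.pyRange 0 (2 * i - 1) 1).map (fun k =>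
      let c := i + min k (2 * i - 2 - k)
      let e := (2 * i - 1) - c
      PySem.List.pyRepeat [' '] e ++ PySem.List.pyRepeat [' ', 'o'] c
        ++ [' '] ++ PySem.List.pyRepeat [' '] e)
    String.ofList (PySem.Chars.join ['\n'] rows)

-- ===== PRECONDITION & SPEC =====
def Spec_hex_lattice (n : Int) (out : String) : Prop := out = hex_lattice_alt n
instance (n : Int) (out : String) : Decidable (Spec_hex_lattice n out) := by unfold Spec_hex_lattice; infer_instance

-- ===== CLAIM (what is proved, stated in full; the proofs are below) =====
def Claim_equal_hex_lattice : Prop := ∀ (n : Int), Dom_hex_lattice n → Spec_hex_lattice n (hex_lattice n)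

-- ===== LEMMAS AND PROOFS =====

-- the body of one lattice row: t pad spaces, c cells " o", a closing space, t pad spaces
def rowBody (t c : Nat) : List Char :=
  List.replicate t ' ' ++ (List.replicate c [' ', 'o']).flatten ++ [' '] ++ List.replicate t ' '

-- the mirror-symmetric row list A accumulates: pads t, t-1, …, 1, 0, 1, …, t
def mirrorBodies (C t : Nat) : List (List Char) :=
  ((List.range (t + 1)).reverse.map (fun j => rowBody j (C - j)))
    ++ (List.range t).map (fun j => rowBody (j + 1) (C - (j + 1)))

def mirror (C t : Nat) : List (List Char) := (mirrorBodies C t).map (· ++ ['\n'])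

-- loop invariant of the shared i/h search loop
theorem hexLoop_inv (fuel : Nat) (n i h : Int) (hi : 0 ≤ i) (hh : h = 3 * i * (i - 1) + 1) :
    0 ≤ (hexLoop fuel n i h).1 ∧
    (hexLoop fuel n i h).2 = 3 * (hexLoop fuel n i h).1 * ((hexLoop fuel n i h).1 - 1) + 1 := by
  induction fuel generalizing i h with
  | zero => exact ⟨hi, hh⟩
  | succ f ih =>
    simp only [hexLoop]
    split
    · exact ih (i + 1) _ (by omega) (by rw [hh]; ring)
    · exact ⟨hi, hh⟩

-- once i ≥ 1, h grows by 6i ≥ 6 per step, so (n-h).toNat fuel reaches h ≥ n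
theorem hexLoop_ge (fuel : Nat) (n i h : Int) (hi : 1 ≤ i) (hf : (n - h).toNat ≤ fuel) :
    n ≤ (hexLoop fuel n i h).2 := by
  induction fuel generalizing i h with
  | zero => simp only [hexLoop]; omega
  | succ f ih =>
    simp only [hexLoop]
    split
    · exact ih (i + 1) _ (by omega) (by omega)
    · omega

theorem hexLoop_fuel_enough (n : Int) (hn : 2 ≤ n) : n ≤ (hexLoop n.toNat n 0 1).2 := by
  obtain ⟨k, hk⟩ : ∃ k, n.toNat = k + 1 := ⟨n.toNat - 1, by omega⟩
  rw [hk]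
  simp only [hexLoop, if_pos (by omega : (1 : Int) < n)]
  norm_num
  exact hexLoop_ge k n 1 1 le_rfl (by omega)

theorem replaceFirst_cons (c o : Char) (s new : List Char) :
    replaceFirst (c :: s) [o] new = if c = o then new ++ s else c :: replaceFirst s [o] new := by
  simp [replaceFirst]

theorem replaceFirst_replicate (t : Nat) (c o : Char) (hco : c ≠ o) (s new : List Char) :
    replaceFirst (List.replicate t c ++ s) [o] new
      = List.replicate t c ++ replaceFirst s [o] new := by
  induction t with
  | zero => simp
  | succ f ih => simp [List.replicate_succ, replaceFirst_cons, hco, ih]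

theorem rep_shift {α : Type} (n : Nat) (a : α) (l : List α) :
    List.replicate n a ++ a :: l = a :: (List.replicate n a ++ l) := by
  rw [← List.singleton_append, ← List.append_assoc, ← List.replicate_succ', List.replicate_succ,
    List.cons_append]

-- one iteration of A's mutation step turns row (t, c+1) into row (t+1, c)
theorem stepA_row (t c : Nat) :
    (replaceFirst (replaceFirst (rowBody t (c + 1) ++ ['\n']) ['o'] []).reverse
        [' '] [' ', ' ']).reverse = rowBody (t + 1) c ++ ['\n'] := by
  have h1 : replaceFirst (rowBody t (c + 1) ++ ['\n']) ['o'] []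
      = List.replicate (t + 1) ' '
          ++ ((List.replicate c [' ', 'o']).flatten ++ ([' '] ++ (List.replicate t ' ' ++ ['\n']))) := by
    simp only [rowBody, List.append_assoc, replaceFirst_replicate t ' ' 'o' (by decide),
      List.replicate_succ, List.flatten_cons, List.cons_append, replaceFirst_cons]
    simp [rep_shift]
  rw [h1]
  have h2 : (List.replicate (t + 1) ' '
        ++ ((List.replicate c [' ', 'o']).flatten ++ ([' '] ++ (List.replicate t ' ' ++ ['\n'])))).reverse
      = '\n' :: (List.replicate (t + 1) ' '
          ++ ((List.replicate c [' ', 'o']).flatten.reverse ++ List.replicate (t + 1) ' ')) := by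
    simp [List.reverse_append, List.replicate_succ', List.append_assoc, rep_shift]
  rw [h2]
  have h3 : replaceFirst ('\n' :: (List.replicate (t + 1) ' '
        ++ ((List.replicate c [' ', 'o']).flatten.reverse ++ List.replicate (t + 1) ' '))) [' '] [' ', ' ']
      = '\n' :: (List.replicate (t + 2) ' '
          ++ ((List.replicate c [' ', 'o']).flatten.reverse ++ List.replicate (t + 1) ' ')) := by
    rw [replaceFirst_cons]
    simp only [if_neg (by decide : ¬('\n' = ' '))]
    rw [List.replicate_succ, List.cons_append, replaceFirst_cons]
    simp [List.replicate_succ]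
  rw [h3]
  simp only [rowBody, List.reverse_cons, List.reverse_append, List.reverse_reverse,
    List.reverse_replicate, List.append_assoc]
  simp [List.replicate_succ]

theorem mirror_succ (C t : Nat) :
    mirror C (t + 1)
      = (rowBody (t + 1) (C - (t + 1)) ++ ['\n']) :: mirror C t
          ++ [rowBody (t + 1) (C - (t + 1)) ++ ['\n']] := by
  simp [mirror, mirrorBodies, List.range_succ, List.map_append]

theorem foldA_mirror (C T : Nat) (hT : T ≤ C) :
    (List.range T).foldl
      (fun (st : List Char × List (List Char)) _ =>
        let a1 := replaceFirst st.1 ['o'] []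
        let a2 := (replaceFirst a1.reverse [' '] [' ', ' ']).reverse
        (a2, a2 :: st.2 ++ [a2]))
      (rowBody 0 C ++ ['\n'], [rowBody 0 C ++ ['\n']])
      = (rowBody T (C - T) ++ ['\n'], mirror C T) := by
  induction T with
  | zero => simp [mirror, mirrorBodies]
  | succ T ih =>
    rw [List.range_succ, List.foldl_append, ih (by omega)]
    simp only [List.foldl_cons, List.foldl_nil]
    have hc : C - T = (C - (T + 1)) + 1 := by omega
    rw [mirror_succ]
    simp only [hc, stepA_row]

theorem join_nil_flatten (xs : List (List Char)) : PySem.Chars.join [] xs = xs.flatten := by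
  induction xs with
  | nil => rfl
  | cons a t ih => cases t <;> simp_all [PySem.Chars.join, List.intercalate, List.intersperse]

-- flattening rows that each end in '\n' is the '\n'-join plus a trailing '\n'
theorem flatten_newline_join (rows : List (List Char)) (hne : rows ≠ []) :
    (rows.map (· ++ ['\n'])).flatten = PySem.Chars.join ['\n'] rows ++ ['\n'] := by
  induction rows with
  | nil => simp at hne
  | cons a t ih =>
    cases t with
    | nil => simp [PySem.Chars.join, List.intercalate]
    | cons b t2 =>
      rw [List.map_cons, List.flatten_cons, ih (by simp), PySem.Chars.join_cons_cons]
      simp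

theorem join_concat (sep : List Char) (bs : List (List Char)) (b : List Char) (hbs : bs ≠ []) :
    PySem.Chars.join sep (bs ++ [b]) = PySem.Chars.join sep bs ++ sep ++ b := by
  induction bs with
  | nil => simp at hbs
  | cons a t ih =>
    cases t with
    | nil => simp [PySem.Chars.join, List.intercalate]
    | cons c t2 =>
      rw [show a :: c :: t2 ++ [b] = a :: c :: (t2 ++ [b]) by simp,
        PySem.Chars.join_cons_cons sep a c (t2 ++ [b]),
        show a ++ sep ++ PySem.Chars.join sep (c :: (t2 ++ [b]))
            = a ++ sep ++ PySem.Chars.join sep (c :: t2 ++ [b]) by simp,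
        ih (by simp), PySem.Chars.join_cons_cons]
      simp

-- the mirror order of pads equals B's closed form over the row index k
theorem mirrorBodies_eq_rows (m : Nat) (hm : 2 ≤ m) :
    mirrorBodies (2 * m - 1) (m - 1)
      = (List.range (2 * m - 1)).map
          (fun k => rowBody ((m - 1) - min k (2 * m - 2 - k)) ((m - 1) + min k (2 * m - 2 - k) + 1)) := by
  apply List.ext_getElem
  · simp [mirrorBodies]; omega
  intro k h1 h2
  have hk : k < 2 * m - 1 := by simpa using h2
  simp only [mirrorBodies, List.getElem_append, List.getElem_map, List.getElem_reverse,
    List.getElem_range, List.length_map, List.length_reverse, List.length_range]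
  rcases Nat.lt_or_ge k m with hkm | hkm
  · rw [dif_pos (by omega)]
    have hmin : min k (2 * m - 2 - k) = k := by omega
    rw [hmin]
    congr 1
    omega
  · rw [dif_neg (by omega)]
    have hmin : min k (2 * m - 2 - k) = 2 * m - 2 - k := by omega
    rw [hmin]
    congr 1 <;> omega

theorem slice_drop_two (W : List Char) (a b : Char) :
    PySem.List.slice (W ++ [a, b]) none (some (-2)) = W := by
  rw [PySem.List.slice_to_neg_ofNat _ 2 (by omega)]
  simp

theorem pyRepeat_flat (n : Nat) (xs : List Char) :
    PySem.List.pyRepeat xs (n : Int) = (List.replicate n xs).flatten := by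
  simp [PySem.List.pyRepeat]

-- B's row for index j < 2m-1 equals rowBody of the closed-form pads
theorem altRow_eq_rowBody (m j : Nat) (hm : 2 ≤ m) (hj : j < 2 * m - 1) :
    (PySem.List.pyRepeat [' '] (((2 * m - 1 : Nat) : Int) - ((m : Int) + min ((j : Nat) : Int) (2 * (m : Int) - 2 - ((j : Nat) : Int))))
      ++ PySem.List.pyRepeat [' ', 'o'] ((m : Int) + min ((j : Nat) : Int) (2 * (m : Int) - 2 - ((j : Nat) : Int)))
      ++ [' '] ++ PySem.List.pyRepeat [' '] (((2 * m - 1 : Nat) : Int) - ((m : Int) + min ((j : Nat) : Int) (2 * (m : Int) - 2 - ((j : Nat) : Int)))))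
    = rowBody ((m - 1) - min j (2 * m - 2 - j)) ((m - 1) + min j (2 * m - 2 - j) + 1) := by
  have hmin : min ((j : Nat) : Int) (2 * (m : Int) - 2 - ((j : Nat) : Int)) = ((min j (2 * m - 2 - j) : Nat) : Int) := by
    push_cast; omega
  have hc : (m : Int) + min ((j : Nat) : Int) (2 * (m : Int) - 2 - ((j : Nat) : Int))
      = (((m - 1) + min j (2 * m - 2 - j) + 1 : Nat) : Int) := by
    rw [hmin]; push_cast; omega
  have he : ((2 * m - 1 : Nat) : Int) - ((m : Int) + min ((j : Nat) : Int) (2 * (m : Int) - 2 - ((j : Nat) : Int)))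
      = ((((m - 1) - min j (2 * m - 2 - j)) : Nat) : Int) := by
    rw [hmin]; push_cast; omega
  rw [he, hc, pyRepeat_flat, pyRepeat_flat]
  simp [rowBody]

-- the whole build phase: A's fold/slice pipeline equals B's closed-form rows joined by '\n'
theorem main_build (m : Nat) (hm : 2 ≤ m) :
    PySem.List.slice
        (PySem.Chars.join []
          ((PySem.List.pyRange 0 ((m : Int) - 1) 1).foldl
            (fun (st : List Char × List (List Char)) _ =>
              let a1 := replaceFirst st.1 ['o'] []
              let a2 := (replaceFirst a1.reverse [' '] [' ', ' ']).reverse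
              (a2, a2 :: st.2 ++ [a2]))
            (PySem.List.pyRepeat [' ', 'o'] ((m : Int) + (m : Int) - 1) ++ [' ', '\n'],
             [PySem.List.pyRepeat [' ', 'o'] ((m : Int) + (m : Int) - 1) ++ [' ', '\n']])).2)
        none (some (-2)) ++ [' ']
      = PySem.Chars.join ['\n']
          ((PySem.List.pyRange 0 (2 * (m : Int) - 1) 1).map (fun k =>
            PySem.List.pyRepeat [' '] ((2 * (m : Int) - 1) - ((m : Int) + min k (2 * (m : Int) - 2 - k)))
              ++ PySem.List.pyRepeat [' ', 'o'] ((m : Int) + min k (2 * (m : Int) - 2 - k))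
              ++ [' '] ++ PySem.List.pyRepeat [' '] ((2 * (m : Int) - 1) - ((m : Int) + min k (2 * (m : Int) - 2 - k))))) := by
  rw [show (m : Int) - 1 = ((m - 1 : Nat) : Int) by omega,
    show (m : Int) + (m : Int) - 1 = ((2 * m - 1 : Nat) : Int) by omega,
    show 2 * (m : Int) - 1 = ((2 * m - 1 : Nat) : Int) by omega,
    PySem.List.pyRange_zero_natCast, PySem.List.pyRange_zero_natCast]
  simp only [List.foldl_map]
  have hinit : PySem.List.pyRepeat [' ', 'o'] ((2 * m - 1 : Nat) : Int) ++ [' ', '\n']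
      = rowBody 0 (2 * m - 1) ++ ['\n'] := by
    rw [pyRepeat_flat]; simp [rowBody]
  rw [hinit, foldA_mirror (2 * m - 1) (m - 1) (by omega)]
  have hrowsR : ((List.range (2 * m - 1)).map (fun k : Nat => (k : Int))).map
        (fun k => PySem.List.pyRepeat [' '] (((2 * m - 1 : Nat) : Int) - ((m : Int) + min k (2 * (m : Int) - 2 - k)))
            ++ PySem.List.pyRepeat [' ', 'o'] ((m : Int) + min k (2 * (m : Int) - 2 - k))
            ++ [' '] ++ PySem.List.pyRepeat [' '] (((2 * m - 1 : Nat) : Int) - ((m : Int) + min k (2 * (m : Int) - 2 - k))))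
      = (List.range (2 * m - 1)).map
          (fun k => rowBody ((m - 1) - min k (2 * m - 2 - k)) ((m - 1) + min k (2 * m - 2 - k) + 1)) := by
    rw [List.map_map]
    apply List.map_congr_left
    intro j hj
    have hj' : j < 2 * m - 1 := List.mem_range.mp hj
    simpa using altRow_eq_rowBody m j hm hj'
  rw [hrowsR]
  rw [show (mirror (2 * m - 1) (m - 1)) = (mirrorBodies (2 * m - 1) (m - 1)).map (· ++ ['\n']) from rfl]
  rw [join_nil_flatten, flatten_newline_join _ (by simp [mirrorBodies]), mirrorBodies_eq_rows m hm]
  -- split off the last row, whose body ends in a space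
  have hsplit : (List.range (2 * m - 1)).map
        (fun k => rowBody ((m - 1) - min k (2 * m - 2 - k)) ((m - 1) + min k (2 * m - 2 - k) + 1))
      = ((List.range (2 * m - 2)).map
          (fun k => rowBody ((m - 1) - min k (2 * m - 2 - k)) ((m - 1) + min k (2 * m - 2 - k) + 1)))
        ++ [rowBody ((m - 1) - min (2 * m - 2) (2 * m - 2 - (2 * m - 2)) ) ((m - 1) + min (2 * m - 2) (2 * m - 2 - (2 * m - 2)) + 1)] := by
    rw [show 2 * m - 1 = (2 * m - 2) + 1 by omega, List.range_succ, List.map_append, List.map_singleton]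
  have hlast : rowBody ((m - 1) - min (2 * m - 2) (2 * m - 2 - (2 * m - 2))) ((m - 1) + min (2 * m - 2) (2 * m - 2 - (2 * m - 2)) + 1)
      = (List.replicate (m - 1) ' ' ++ (List.replicate m [' ', 'o']).flatten ++ [' '] ++ List.replicate (m - 2) ' ') ++ [' '] := by
    have h1 : (m - 1) - min (2 * m - 2) (2 * m - 2 - (2 * m - 2)) = m - 1 := by omega
    have h2 : (m - 1) + min (2 * m - 2) (2 * m - 2 - (2 * m - 2)) + 1 = m := by omega
    rw [h1, h2]
    have hrep : List.replicate (m - 1) ' ' = List.replicate (m - 2) ' ' ++ [' '] := by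
      rw [← List.replicate_succ']; congr 1; omega
    simp only [rowBody]
    nth_rewrite 2 [hrep]
    simp [List.append_assoc]
  rw [hsplit, hlast]
  rw [join_concat _ _ _ (by
    intro hnil
    have := congrArg List.length hnil
    simp at this
    omega)]
  rw [show (PySem.Chars.join ['\n'] ((List.range (2 * m - 2)).map
        (fun k => rowBody ((m - 1) - min k (2 * m - 2 - k)) ((m - 1) + min k (2 * m - 2 - k) + 1)))
      ++ ['\n'] ++ ((List.replicate (m - 1) ' ' ++ (List.replicate m [' ', 'o']).flatten ++ [' '] ++ List.replicate (m - 2) ' ') ++ [' '])) ++ ['\n']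
      = (PySem.Chars.join ['\n'] ((List.range (2 * m - 2)).map
        (fun k => rowBody ((m - 1) - min k (2 * m - 2 - k)) ((m - 1) + min k (2 * m - 2 - k) + 1)))
      ++ ['\n'] ++ (List.replicate (m - 1) ' ' ++ (List.replicate m [' ', 'o']).flatten ++ [' '] ++ List.replicate (m - 2) ' ')) ++ [' ', '\n'] by
    simp [List.append_assoc]]
  rw [slice_drop_two]
  simp [List.append_assoc]

-- ===== VERDICT (by name: the statement is the Claim_ definition above) =====
theorem hex_lattice_spec : Claim_equal_hex_lattice := by
  intro n _
  unfold Spec_hex_lattice hex_lattice hex_lattice_alt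
  set p := hexLoop n.toNat n 0 1 with hp
  by_cases hgt : p.2 > n
  · simp [hgt]
  · simp only [hgt, if_false]
    by_cases hn1 : n = 1
    · simp [hn1]
    · simp only [hn1, if_false]
      have hinv := hexLoop_inv n.toNat n 0 1 le_rfl (by ring)
      rw [← hp] at hinv
      have hpos : 0 ≤ 3 * p.1 * (p.1 - 1) := by
        rcases (by omega : p.1 = 0 ∨ 1 ≤ p.1) with h0 | h0
        · rw [h0]; norm_num
        · exact mul_nonneg (by omega) (by omega)
      have hn2 : 2 ≤ n := by omega
      have hge := hexLoop_fuel_enough n hn2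
      rw [← hp] at hge
      have hp2 : 2 ≤ p.1 := by
        rcases (by omega : p.1 = 0 ∨ p.1 = 1 ∨ 2 ≤ p.1) with h0 | h0 | h0
        · rw [h0] at hinv; norm_num at hinv; omega
        · rw [h0] at hinv; norm_num at hinv; omega
        · exact h0
      obtain ⟨m, hm⟩ : ∃ m : Nat, p.1 = (m : Int) := ⟨p.1.toNat, by omega⟩
      rw [hm]
      have hm2 : 2 ≤ m := by omega
      congr 1
      exact main_build m hm2
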